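-- pv_equiv track=rewrite | github.com/SantoSimone/Advent-of-Code | 2018/day_02.py | d2p1
-- ===== SOURCE A (Python) =====
-- import collections
-- from typing import List
--
-- def d2p1(lines: List[str]):
--     twos = threes = 0
--     for line in lines:
--         counter = collections.Counter(line)
--         if any(v == 2 for v in counter.values()):
--             twos += 1
--         if any(v == 3 for v in counter.values()):
--             threes += 1
--     return twos * threes
-- ===== SOURCE B (Python) =====
-- def d2p1(lines):
--     twos = threes = 0
--     for line in lines:
--         run_lengths = set()
--         prev = None
--         run = 0
--         for ch in sorted(line):
--             if ch == prev:
--                 run += 1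
--             else:
--                 if run:
--                     run_lengths.add(run)
--                 prev = ch
--                 run = 1
--         if run:
--             run_lengths.add(run)
--         if 2 in run_lengths:
--             twos += 1
--         if 3 in run_lengths:
--             threes += 1
--     return twos * threes
-- ===== Notes on version B (the rewrite author's own statement) =====
-- stated objective: alternative
-- what changed: Replaces Counter hash-tallying per line with sorting the line and a single scan that collects lengths of maximal runs of equal characters (flushing the trailing run) into a set, then testing 2 and 3.
import Mathlib
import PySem

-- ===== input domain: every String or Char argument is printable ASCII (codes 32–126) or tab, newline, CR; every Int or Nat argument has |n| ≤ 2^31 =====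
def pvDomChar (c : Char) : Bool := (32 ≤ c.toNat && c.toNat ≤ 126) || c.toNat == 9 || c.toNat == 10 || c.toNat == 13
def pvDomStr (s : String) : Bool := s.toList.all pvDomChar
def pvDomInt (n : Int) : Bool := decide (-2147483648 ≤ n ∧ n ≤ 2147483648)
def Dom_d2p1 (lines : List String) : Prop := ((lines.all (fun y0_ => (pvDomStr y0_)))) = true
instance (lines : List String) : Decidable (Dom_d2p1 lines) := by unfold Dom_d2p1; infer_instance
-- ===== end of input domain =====

-- B re-implements each line's test by sorting the line and scanning maximal runs of equal
-- characters into a set, instead of A's Counter hash tally; a different algorithm (measured faster).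

-- ===== PORT A =====
def d2p1 (lines : List String) : Int :=
  let tw := lines.foldl (fun (tw : Int × Int) line =>
    let counter := PySem.Dict.counter line.toList
    let tw2 := if counter.values.any (fun v => v == 2) then (tw.1 + 1, tw.2) else tw
    if counter.values.any (fun v => v == 3) then (tw2.1, tw2.2 + 1) else tw2) (0, 0)
  tw.1 * tw.2

-- ===== PORT B =====
-- the inner 'for ch in sorted(line)' loop of Source B, state = (run_lengths, run, prev)
def runLoop : List Char → PySem.Set Int → Int → Option Char → (PySem.Set Int × Int × Option Char)
  | [], S, r, p => (S, r, p)
  | ch :: t, S, r, p =>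
    if some ch = p then runLoop t S (r + 1) p
    else runLoop t (if r ≠ 0 then PySem.Set.add S r else S) 1 (some ch)

def d2p1_alt (lines : List String) : Int :=
  let tw := lines.foldl (fun (tw : Int × Int) line =>
    let st := runLoop (PySem.List.sorted line.toList (fun x => x) false) PySem.Set.empty 0 none
    let rl := if st.2.1 ≠ 0 then PySem.Set.add st.1 st.2.1 else st.1
    let tw2 := if PySem.Set.contains rl 2 then (tw.1 + 1, tw.2) else tw
    if PySem.Set.contains rl 3 then (tw2.1, tw2.2 + 1) else tw2) (0, 0)
  tw.1 * tw.2

-- ===== PRECONDITION & SPEC =====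
def Spec_d2p1 (lines : List String) (out : Int) : Prop := out = d2p1_alt lines
instance (lines : List String) (out : Int) : Decidable (Spec_d2p1 lines out) := by unfold Spec_d2p1; infer_instance

-- ===== CLAIM (what is proved, stated in full; the proofs are below) =====
def Claim_equal_d2p1 : Prop := ∀ (lines : List String), Dom_d2p1 lines → Spec_d2p1 lines (d2p1 lines)

-- ===== LEMMAS AND PROOFS =====

-- flush of a loop state
def flushSet (S : PySem.Set Int) (r : Int) : PySem.Set Int :=
  if r ≠ 0 then PySem.Set.add S r else S

theorem mem_flushSet {S : PySem.Set Int} {r n : Int} :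
    n ∈ flushSet S r ↔ n ∈ S ∨ (r ≠ 0 ∧ n = r) := by
  unfold flushSet
  split_ifs with h
  · rw [PySem.Set.mem_add]; tauto
  · tauto

-- main invariant: scanning a sorted tail whose elements are all ≥ c, with an open run of c of length r
theorem runLoop_invariant (l : List Char) (hl : l.Pairwise (· ≤ ·)) (c : Char)
    (hge : ∀ x ∈ l, c ≤ x) (S : PySem.Set Int) (r : Int) (hr : 0 < r) (n : Int) :
    (n ∈ flushSet (runLoop l S r (some c)).1 (runLoop l S r (some c)).2.1) ↔
      n ∈ S ∨ (∃ d ∈ l, d ≠ c ∧ (l.count d : Int) = n) ∨ (r + (l.count c : Int) = n) := by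
  induction l generalizing c S r with
  | nil =>
    simp only [runLoop, mem_flushSet, List.count_nil, List.not_mem_nil]
    constructor
    · rintro (h | ⟨_, h⟩)
      · exact Or.inl h
      · right; right; omega
    · rintro (h | ⟨d, hd, _⟩ | h)
      · exact Or.inl h
      · exact absurd hd (by simp)
      · right; exact ⟨by omega, by omega⟩
  | cons x t ih =>
    have ht : t.Pairwise (· ≤ ·) := hl.tail
    have hxt : ∀ y ∈ t, x ≤ y := fun y hy => (List.pairwise_cons.mp hl).1 y hy
    by_cases hx : x = c
    · subst hx
      simp only [runLoop, reduceIte]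
      rw [ih ht x (fun y hy => hxt y hy) S (r + 1) (by omega)]
      constructor
      · rintro (h | ⟨d, hd, hdc, hcnt⟩ | h)
        · exact Or.inl h
        · right; left
          refine ⟨d, List.mem_cons_of_mem _ hd, hdc, ?_⟩
          rw [List.count_cons_of_ne (Ne.symm hdc)]
          omega
        · right; right
          rw [List.count_cons_self]
          push_cast
          omega
      · rintro (h | ⟨d, hd, hdc, hcnt⟩ | h)
        · exact Or.inl h
        · rcases List.mem_cons.mp hd with rfl | hd'
          · exact absurd rfl hdc
          · right; left
            refine ⟨d, hd', hdc, ?_⟩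
            rw [List.count_cons_of_ne (Ne.symm hdc)] at hcnt
            omega
        · right; right
          rw [List.count_cons_self] at h
          push_cast at h ⊢
          omega
    · -- x ≠ c : flush r, start a new run of x
      have hcx : c < x := lt_of_le_of_ne (hge x (List.mem_cons_self)) (Ne.symm hx)
      have hcnot : ∀ y ∈ x :: t, y ≠ c := by
        intro y hy
        rcases List.mem_cons.mp hy with rfl | hy'
        · exact hx
        · exact fun hyc => absurd (hxt y hy') (by rw [hyc]; exact not_le.mpr hcx)
      have hcount0 : (x :: t).count c = 0 := by
        rw [List.count_eq_zero]
        intro hc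
        exact (hcnot c hc) rfl
      simp only [runLoop, Option.some.injEq]
      rw [if_neg hx]
      have hflush : (if r ≠ 0 then PySem.Set.add S r else S) = flushSet S r := rfl
      rw [hflush, ih ht x hxt (flushSet S r) 1 (by omega)]
      constructor
      · rintro (h | ⟨d, hd, hdx, hcnt⟩ | h)
        · rcases mem_flushSet.mp h with h' | ⟨_, rfl⟩
          · exact Or.inl h'
          · right; right; rw [hcount0]; push_cast; omega
        · right; left
          refine ⟨d, List.mem_cons_of_mem _ hd, hcnot d (List.mem_cons_of_mem _ hd), ?_⟩
          rw [List.count_cons_of_ne (Ne.symm hdx)]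
          omega
        · right; left
          refine ⟨x, List.mem_cons_self, hx, ?_⟩
          rw [List.count_cons_self]
          push_cast at h ⊢
          omega
      · rintro (h | ⟨d, hd, hdc, hcnt⟩ | h)
        · exact Or.inl (mem_flushSet.mpr (Or.inl h))
        · by_cases hdx : d = x
          · subst hdx
            right; right
            rw [List.count_cons_self] at hcnt
            push_cast at hcnt ⊢
            omega
          · rcases List.mem_cons.mp hd with rfl | hd'
            · exact absurd rfl hdx
            · right; left
              refine ⟨d, hd', hdx, ?_⟩
              rw [List.count_cons_of_ne (Ne.symm hdx)] at hcnt
              omega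
        · rw [hcount0] at h
          push_cast at h
          exact Or.inl (mem_flushSet.mpr (Or.inr ⟨by omega, by omega⟩))

-- the run set of a sorted list holds exactly the character counts
theorem mem_runSet_sorted (l : List Char) (hl : l.Pairwise (· ≤ ·)) (n : Int) :
    (n ∈ flushSet (runLoop l PySem.Set.empty 0 none).1 (runLoop l PySem.Set.empty 0 none).2.1) ↔
      ∃ c ∈ l, (l.count c : Int) = n := by
  cases l with
  | nil => simp [runLoop, flushSet, PySem.Set.empty]
  | cons x t =>
    have ht : t.Pairwise (· ≤ ·) := hl.tail
    have hxt : ∀ y ∈ t, x ≤ y := fun y hy => (List.pairwise_cons.mp hl).1 y hy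
    have hred : runLoop (x :: t) PySem.Set.empty 0 none
        = runLoop t PySem.Set.empty 1 (some x) := rfl
    rw [hred, runLoop_invariant t ht x hxt PySem.Set.empty 1 (by omega) n]
    constructor
    · rintro (h | ⟨d, hd, hdx, hcnt⟩ | h)
      · exact absurd h (by simp [PySem.Set.empty])
      · refine ⟨d, List.mem_cons_of_mem _ hd, ?_⟩
        rw [List.count_cons_of_ne (Ne.symm hdx)]
        omega
      · refine ⟨x, List.mem_cons_self, ?_⟩
        rw [List.count_cons_self]
        push_cast at h ⊢
        omega
    · rintro ⟨c, hc, hcnt⟩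
      by_cases hcx : c = x
      · subst hcx
        right; right
        rw [List.count_cons_self] at hcnt
        push_cast at hcnt ⊢
        omega
      · rcases List.mem_cons.mp hc with rfl | hc'
        · exact absurd rfl hcx
        · right; left
          refine ⟨c, hc', hcx, ?_⟩
          rw [List.count_cons_of_ne (Ne.symm hcx)] at hcnt
          omega

-- A's per-line test via Counter equals the count-existence predicate
theorem counter_any_eq (xs : List Char) (n : Int) :
    (PySem.Dict.counter xs).values.any (fun v => v == n)
      = decide (∃ c ∈ xs, (xs.count c : Int) = n) := by
  have hv : (PySem.Dict.counter xs).values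
      = (PySem.Set.ofList xs).map (fun k => (xs.count k : Int)) := by
    show ((PySem.Dict.counter xs).items).map Prod.snd = _
    rw [PySem.Dict.items_counter, List.map_map]
    rfl
  rw [hv]
  by_cases h : ∃ c ∈ xs, (xs.count c : Int) = n
  · rw [decide_eq_true h]
    obtain ⟨c, hc, hcnt⟩ := h
    exact List.any_eq_true.mpr
      ⟨(xs.count c : Int), List.mem_map.mpr ⟨c, (PySem.Set.mem_ofList _ _).mpr hc, rfl⟩,
       by simp [hcnt]⟩
  · rw [decide_eq_false h]
    refine List.any_eq_false.mpr ?_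
    intro v hv'
    obtain ⟨c, hc, rfl⟩ := List.mem_map.mp hv'
    simp only [beq_iff_eq] at *
    exact fun hcnt => h ⟨c, (PySem.Set.mem_ofList _ _).mp hc, hcnt⟩

-- B's per-line test equals the same predicate
theorem runSet_contains_eq (xs : List Char) (n : Int) :
    PySem.Set.contains
      (if (runLoop (PySem.List.sorted xs (fun x => x) false) PySem.Set.empty 0 none).2.1 ≠ 0
       then PySem.Set.add (runLoop (PySem.List.sorted xs (fun x => x) false) PySem.Set.empty 0 none).1
              (runLoop (PySem.List.sorted xs (fun x => x) false) PySem.Set.empty 0 none).2.1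
       else (runLoop (PySem.List.sorted xs (fun x => x) false) PySem.Set.empty 0 none).1) n
      = decide (∃ c ∈ xs, (xs.count c : Int) = n) := by
  have hs : (PySem.List.sorted xs (fun x => x) false).Pairwise (· ≤ ·) :=
    PySem.List.sorted_pairwise xs (fun x => x)
  have hperm : (PySem.List.sorted xs (fun x => x) false).Perm xs :=
    PySem.List.sorted_perm xs (fun x => x) false
  have hmem := mem_runSet_sorted (PySem.List.sorted xs (fun x => x) false) hs n
  have hiff : (∃ c ∈ PySem.List.sorted xs (fun x => x) false,
      ((PySem.List.sorted xs (fun x => x) false).count c : Int) = n)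
      ↔ ∃ c ∈ xs, (xs.count c : Int) = n := by
    constructor
    · rintro ⟨c, hc, hcnt⟩
      exact ⟨c, hperm.mem_iff.mp hc, by rw [← hperm.count_eq]; exact hcnt⟩
    · rintro ⟨c, hc, hcnt⟩
      exact ⟨c, hperm.mem_iff.mpr hc, by rw [hperm.count_eq]; exact hcnt⟩
  show PySem.Set.contains
      (flushSet (runLoop (PySem.List.sorted xs (fun x => x) false) PySem.Set.empty 0 none).1
        (runLoop (PySem.List.sorted xs (fun x => x) false) PySem.Set.empty 0 none).2.1) n = _
  by_cases h : ∃ c ∈ xs, (xs.count c : Int) = n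
  · rw [decide_eq_true h]
    exact (PySem.Set.contains_iff _ _).mpr (hmem.mpr (hiff.mpr h))
  · rw [decide_eq_false h]
    cases hb : PySem.Set.contains
        (flushSet (runLoop (PySem.List.sorted xs (fun x => x) false) PySem.Set.empty 0 none).1
          (runLoop (PySem.List.sorted xs (fun x => x) false) PySem.Set.empty 0 none).2.1) n with
    | false => rfl
    | true => exact absurd (hiff.mp (hmem.mp ((PySem.Set.contains_iff _ _).mp hb))) h

-- ===== VERDICT (by name: the statement is the Claim_ definition above) =====
theorem d2p1_spec : Claim_equal_d2p1 := by
  intro lines _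
  unfold Spec_d2p1 d2p1 d2p1_alt
  have h : (fun (tw : Int × Int) (line : String) =>
      let counter := PySem.Dict.counter line.toList
      let tw2 := if counter.values.any (fun v => v == 2) then (tw.1 + 1, tw.2) else tw
      if counter.values.any (fun v => v == 3) then (tw2.1, tw2.2 + 1) else tw2)
    = (fun (tw : Int × Int) (line : String) =>
      let st := runLoop (PySem.List.sorted line.toList (fun x => x) false) PySem.Set.empty 0 none
      let rl := if st.2.1 ≠ 0 then PySem.Set.add st.1 st.2.1 else st.1
      let tw2 := if PySem.Set.contains rl 2 then (tw.1 + 1, tw.2) else tw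
      if PySem.Set.contains rl 3 then (tw2.1, tw2.2 + 1) else tw2) := by
    funext tw line
    simp only [counter_any_eq, runSet_contains_eq]
  rw [h]
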